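-- pv_equiv track=rewrite | github.com/data-infra/data-mining | cluster/DBSCAN.py | getSurroundPoint
-- ===== SOURCE A (Python) =====
-- def distance(point1,point2):
--     return max(abs(point1[0] - point2[0]),abs(point1[1] - point2[1]))
--
-- def getSurroundPoint(points,Eps=1):
--     surroundPoints = {}  # 每个元素默认是一个空列表
--     for idx1,point1 in enumerate(points):
--         for idx2,point2 in enumerate(points):
--             if (idx1 < idx2):
--                 if(distance(point1,point2)<=Eps):
--                     surroundPoints.setdefault(idx1,[])   # 设置每个点的默认值邻节点为空列表
--                     surroundPoints.setdefault(idx2, [])   # 设置每个点的默认值邻节点为空列表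
--                     surroundPoints[idx1].append(idx2)
--                     surroundPoints[idx2].append(idx1)
--     return surroundPoints
-- ===== SOURCE B (Python) =====
-- # Grid bucketing by Eps-sized Chebyshev cells: only candidate pairs from the 3x3
-- # neighborhood of each point's cell are tested, instead of all O(n^2) pairs.
-- def getSurroundPoint(points, Eps=1):
--     res = {}
--     if Eps < 0:
--         return res
--     if Eps == 0:
--         def key(p):
--             return (p[0], p[1])
--         offs = [(0, 0)]
--     else:
--         def key(p):
--             return (p[0] // Eps, p[1] // Eps)
--         offs = [(dx, dy) for dx in (-1, 0, 1) for dy in (-1, 0, 1)]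
--     grid = {}
--     for j, q in enumerate(points):
--         grid.setdefault(key(q), []).append((j, q))
--     for i, p in enumerate(points):
--         cx, cy = key(p)
--         cand = []
--         for dx, dy in offs:
--             for j, q in grid.get((cx + dx, cy + dy), []):
--                 if i < j and max(abs(p[0] - q[0]), abs(p[1] - q[1])) <= Eps:
--                     cand.append(j)
--         for j in sorted(cand):
--             res.setdefault(i, [])
--             res.setdefault(j, [])
--             res[i].append(j)
--             res[j].append(i)
--     return res
-- ===== Notes on version B (the rewrite author's own statement) =====
-- stated objective: alternative
-- what changed: B buckets the points into Eps-sized grid cells once and tests only candidate pairs drawn from the 3x3 cell neighborhood of each point (sorting each small candidate list to recover A's order), instead of A's all-pairs double scan.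
import Mathlib
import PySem

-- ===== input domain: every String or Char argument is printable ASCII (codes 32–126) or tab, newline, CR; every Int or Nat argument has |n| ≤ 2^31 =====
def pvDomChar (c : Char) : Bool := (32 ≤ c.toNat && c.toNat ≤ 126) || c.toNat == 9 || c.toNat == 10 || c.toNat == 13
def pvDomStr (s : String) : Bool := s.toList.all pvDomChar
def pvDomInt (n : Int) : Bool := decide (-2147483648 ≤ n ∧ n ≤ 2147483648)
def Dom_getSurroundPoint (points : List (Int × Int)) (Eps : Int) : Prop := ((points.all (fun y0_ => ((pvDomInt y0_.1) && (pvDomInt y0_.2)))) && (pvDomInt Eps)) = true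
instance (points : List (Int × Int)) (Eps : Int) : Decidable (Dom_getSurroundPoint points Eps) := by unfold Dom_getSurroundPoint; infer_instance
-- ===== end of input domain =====

-- B replaces A's all-pairs scan by grid bucketing into Eps-sized Chebyshev cells,
-- testing only candidate pairs from the 3x3 neighborhood of each point's cell (alternative algorithm).

-- ===== PORT A =====
-- helper `distance` (Chebyshev distance)
def distance (p q : Int × Int) : Int := max |p.1 - q.1| |p.2 - q.2|

def getSurroundPoint (points : List (Int × Int)) (Eps : Int) : List (Int × List Int) :=
  ((PySem.List.enumerate points).foldl (fun d ip =>
      (PySem.List.enumerate points).foldl (fun d jq =>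
        if ip.1 < jq.1 then
          if distance ip.2 jq.2 ≤ Eps then
            let d1 := d.setdefault ip.1 []
            let d2 := d1.setdefault jq.1 []
            let d3 := d2.modify ip.1 [] (· ++ [jq.1])
            d3.modify jq.1 [] (· ++ [ip.1])
          else d
        else d) d)
    PySem.Dict.empty).items

-- ===== PORT B =====
-- B's `key` function: the Eps-sized cell of a point (the coordinates themselves when Eps = 0)
def pvKeyB (Eps : Int) (p : Int × Int) : Int × Int :=
  if Eps = 0 then (p.1, p.2)
  else (PySem.Int.floordiv p.1 Eps, PySem.Int.floordiv p.2 Eps)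

-- B's `offs`: which neighboring cells must be searched
def pvOffsB (Eps : Int) : List (Int × Int) :=
  if Eps = 0 then [(0, 0)]
  else [(-1, -1), (-1, 0), (-1, 1), (0, -1), (0, 0), (0, 1), (1, -1), (1, 0), (1, 1)]

def getSurroundPoint_alt (points : List (Int × Int)) (Eps : Int) : List (Int × List Int) :=
  if Eps < 0 then (PySem.Dict.empty : PySem.Dict Int (List Int)).items
  else
    let grid : PySem.Dict (Int × Int) (List (Int × (Int × Int))) :=
      (PySem.List.enumerate points).foldl
        (fun g jq =>
          (g.setdefault (pvKeyB Eps jq.2) []).modify (pvKeyB Eps jq.2) [] (· ++ [jq]))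
        PySem.Dict.empty
    ((PySem.List.enumerate points).foldl (fun d ip =>
        let c := pvKeyB Eps ip.2
        let cand := (pvOffsB Eps).foldl (fun cand o =>
            (grid.getD (c.1 + o.1, c.2 + o.2) []).foldl (fun cand jq =>
              if ip.1 < jq.1 ∧ max |ip.2.1 - jq.2.1| |ip.2.2 - jq.2.2| ≤ Eps then
                cand ++ [jq.1]
              else cand) cand)
          ([] : List Int)
        (PySem.List.sorted cand (fun x => x)).foldl (fun d j =>
          let d1 := d.setdefault ip.1 []
          let d2 := d1.setdefault j []
          let d3 := d2.modify ip.1 [] (· ++ [j])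
          d3.modify j [] (· ++ [ip.1])) d)
      PySem.Dict.empty).items

-- ===== PRECONDITION & SPEC =====
def Spec_getSurroundPoint (points : List (Int × Int)) (Eps : Int) (out : List (Int × List Int)) : Prop := out = getSurroundPoint_alt points Eps
instance (points : List (Int × Int)) (Eps : Int) (out : List (Int × List Int)) : Decidable (Spec_getSurroundPoint points Eps out) := by unfold Spec_getSurroundPoint; infer_instance

-- ===== CLAIM (what is proved, stated in full; the proofs are below) =====
def Claim_equal_getSurroundPoint : Prop := ∀ (points : List (Int × Int)) (Eps : Int), Dom_getSurroundPoint points Eps → Spec_getSurroundPoint points Eps (getSurroundPoint points Eps)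

-- ===== LEMMAS AND PROOFS =====

-- proof-side abbreviations: the pair predicate, the dict-update step shared by both
-- programs, A's lexicographic pair list, the fold that builds the dict from pairs,
-- and B's grid as a named term
abbrev pvPred (Eps : Int) (ip jq : Int × (Int × Int)) : Prop :=
  ip.1 < jq.1 ∧ max |ip.2.1 - jq.2.1| |ip.2.2 - jq.2.2| ≤ Eps

def pvLink (d : PySem.Dict Int (List Int)) (i j : Int) : PySem.Dict Int (List Int) :=
  let d1 := d.setdefault i []
  let d2 := d1.setdefault j []
  let d3 := d2.modify i [] (· ++ [j])
  d3.modify j [] (· ++ [i])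

def pvPairs (points : List (Int × Int)) (Eps : Int) : List (Int × Int) :=
  (PySem.List.enumerate points).flatMap (fun ip =>
    ((PySem.List.enumerate points).filter (fun jq => decide (pvPred Eps ip jq))).map
      (fun jq => (ip.1, jq.1)))

def pvBuild (l : List (Int × Int)) : PySem.Dict Int (List Int) :=
  l.foldl (fun d pr => pvLink d pr.1 pr.2) PySem.Dict.empty

def pvGrid (points : List (Int × Int)) (Eps : Int) : PySem.Dict (Int × Int) (List (Int × (Int × Int))) :=
  (PySem.List.enumerate points).foldl
    (fun g jq => (g.setdefault (pvKeyB Eps jq.2) []).modify (pvKeyB Eps jq.2) [] (· ++ [jq]))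
    PySem.Dict.empty

-- setdefault k dflt followed by modify k dflt f collapses to modify k dflt f
lemma pv_setdefault_modify {κ ν : Type} [BEq κ] [LawfulBEq κ] (d : PySem.Dict κ ν)
    (k : κ) (dflt : ν) (f : ν → ν) :
    (d.setdefault k dflt).modify k dflt f = d.modify k dflt f := by
  by_cases h : d.contains k
  · rw [PySem.Dict.setdefault_of_contains d dflt h]
  · rw [PySem.Dict.setdefault_of_not_contains d dflt (by simpa using h)]
    unfold PySem.Dict.modify
    rw [PySem.Dict.getD_insert_self, PySem.Dict.insert_insert_self,
        PySem.Dict.getD_of_not_contains d dflt (by simpa using h)]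

-- bucket contents of the grid: exactly the enumerate entries whose cell is c, in order
lemma pv_grid_getD (points : List (Int × Int)) (Eps : Int) (c : Int × Int) :
    (pvGrid points Eps).getD c [] =
      (PySem.List.enumerate points).filter (fun jq => pvKeyB Eps jq.2 == c) := by
  unfold pvGrid
  rw [PySem.List.foldl_congr_mem _ _
      (fun g jq => g.modify (pvKeyB Eps jq.2) [] (· ++ [jq])) _
      (fun g jq _ => pv_setdefault_modify g (pvKeyB Eps jq.2) [] (· ++ [jq]))]
  have : (PySem.List.enumerate points).foldl
      (fun (g : PySem.Dict (Int × Int) (List (Int × (Int × Int)))) jq => g.modify (pvKeyB Eps jq.2) [] (· ++ [jq])) PySem.Dict.empty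
      = ((PySem.List.enumerate points).map (fun jq => (pvKeyB Eps jq.2, jq))).foldl
        (fun g p => g.modify p.1 [] (· ++ [p.2])) PySem.Dict.empty := by
    rw [List.foldl_map]
  rw [this, PySem.Dict.getD_foldl_modify_append]
  simp [List.filter_map, Function.comp_def]

-- entries of enumerate are determined by their index
lemma pv_enum_inj {points : List (Int × Int)} {p q : Int × (Int × Int)}
    (hp : p ∈ PySem.List.enumerate points) (hq : q ∈ PySem.List.enumerate points)
    (h : p.1 = q.1) : p = q := by
  rw [PySem.List.mem_enumerate_iff] at hp hq
  obtain ⟨a, ha, rfl⟩ := hp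
  obtain ⟨b, hb, rfl⟩ := hq
  simp only at h
  have : a = b := by omega
  subst this; rfl

-- a point within Eps of p (0 < Eps) lands in a cell adjacent to p's in each coordinate
lemma pv_floor_adj {Eps x y : Int} (hE : 0 < Eps) (h : |x - y| ≤ Eps) :
    PySem.Int.floordiv x Eps - 1 ≤ PySem.Int.floordiv y Eps ∧
    PySem.Int.floordiv y Eps ≤ PySem.Int.floordiv x Eps + 1 := by
  rw [PySem.Int.floordiv_eq_ediv_of_pos hE, PySem.Int.floordiv_eq_ediv_of_pos hE]
  rw [abs_le] at h
  have hne : Eps ≠ 0 := by omega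
  have h1 : (x - Eps) / Eps ≤ y / Eps := Int.ediv_le_ediv hE (by omega)
  have h2 : y / Eps ≤ (x + Eps) / Eps := Int.ediv_le_ediv hE (by omega)
  have e1 : (x - Eps) / Eps = x / Eps - 1 := by
    have := Int.add_mul_ediv_right x (-1) hne; simpa [sub_eq_add_neg] using this
  have e2 : (x + Eps) / Eps = x / Eps + 1 := by
    have := Int.add_mul_ediv_right x 1 hne; simpa using this
  omega

-- if the distance is within Eps (0 ≤ Eps), the cell offset is one of pvOffsB
lemma pv_cover (Eps : Int) (h0 : 0 ≤ Eps) (p q : Int × Int)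
    (hd : max |p.1 - q.1| |p.2 - q.2| ≤ Eps) :
    ((pvKeyB Eps q).1 - (pvKeyB Eps p).1, (pvKeyB Eps q).2 - (pvKeyB Eps p).2) ∈ pvOffsB Eps := by
  have hx : |p.1 - q.1| ≤ Eps := le_trans (le_max_left _ _) hd
  have hy : |p.2 - q.2| ≤ Eps := le_trans (le_max_right _ _) hd
  rcases eq_or_lt_of_le h0 with hE | hE
  · rw [abs_le] at hx hy
    have hx0 : q.1 = p.1 := by omega
    have hy0 : q.2 = p.2 := by omega
    simp [pvKeyB, pvOffsB, ← hE, hx0, hy0]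
  · have hne : Eps ≠ 0 := by omega
    obtain ⟨ha1, ha2⟩ := pv_floor_adj hE hx
    obtain ⟨hb1, hb2⟩ := pv_floor_adj hE hy
    simp only [pvKeyB, pvOffsB, if_neg hne]
    set a := PySem.Int.floordiv q.1 Eps - PySem.Int.floordiv p.1 Eps with hadef
    set b := PySem.Int.floordiv q.2 Eps - PySem.Int.floordiv p.2 Eps with hbdef
    have ha : a = -1 ∨ a = 0 ∨ a = 1 := by omega
    have hb : b = -1 ∨ b = 0 ∨ b = 1 := by omega
    rcases ha with h|h|h <;> rcases hb with h'|h'|h' <;> simp [h, h']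

lemma pv_offs_nodup (Eps : Int) : (pvOffsB Eps).Nodup := by
  unfold pvOffsB; split <;> decide

-- the sorted candidate list of B equals A's in-order neighbor scan for each ip
lemma pv_cand_eq (points : List (Int × Int)) (Eps : Int) (h0 : 0 ≤ Eps) (ip : Int × (Int × Int)) :
    PySem.List.sorted
      ((pvOffsB Eps).foldl (fun cand o =>
        ((pvGrid points Eps).getD ((pvKeyB Eps ip.2).1 + o.1, (pvKeyB Eps ip.2).2 + o.2) []).foldl
          (fun cand jq => if pvPred Eps ip jq then cand ++ [jq.1] else cand) cand) [])
      (fun x => x)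
    = ((PySem.List.enumerate points).filter (fun jq => decide (pvPred Eps ip jq))).map (·.1) := by
  set E := PySem.List.enumerate points with hE
  set c := pvKeyB Eps ip.2 with hc
  set g : Int × Int → List Int := fun o =>
    ((E.filter (fun jq => pvKeyB Eps jq.2 == (c.1 + o.1, c.2 + o.2))).filter
      (fun jq => decide (pvPred Eps ip jq))).map (·.1) with hg
  have hcand : (pvOffsB Eps).foldl (fun cand o =>
        ((pvGrid points Eps).getD (c.1 + o.1, c.2 + o.2) []).foldl
          (fun cand jq => if pvPred Eps ip jq then cand ++ [jq.1] else cand) cand) []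
      = (pvOffsB Eps).flatMap g := by
    have step : ∀ (cand : List Int), ∀ o ∈ pvOffsB Eps,
        ((pvGrid points Eps).getD (c.1 + o.1, c.2 + o.2) []).foldl
          (fun cand jq => if pvPred Eps ip jq then cand ++ [jq.1] else cand) cand
        = cand ++ g o := by
      intro cand o _
      rw [pv_grid_getD, PySem.List.foldl_append_ite (pvPred Eps ip) (fun jq => jq.1)]
    rw [PySem.List.foldl_congr_mem _ _ (fun cand o => cand ++ g o) _ step,
        PySem.List.foldl_append_eq_flatMap]
    simp
  rw [hcand]
  set ys : List Int := (E.filter (fun jq => decide (pvPred Eps ip jq))).map (·.1) with hys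
  have hpwE : E.Pairwise (fun p q => p.1 < q.1) := PySem.List.pairwise_lt_enumerate points 0
  have hpw_ys : ys.Pairwise (· < ·) := by
    rw [hys, List.pairwise_map]
    exact hpwE.filter _
  have nodup_ys : ys.Nodup := hpw_ys.imp (fun h => ne_of_lt h)
  have mem_g : ∀ (a : Int) (o : Int × Int), a ∈ g o ↔
      ∃ jq ∈ E, pvKeyB Eps jq.2 = (c.1 + o.1, c.2 + o.2) ∧ pvPred Eps ip jq ∧ jq.1 = a := by
    intro a o
    simp only [hg, List.mem_map, List.mem_filter, decide_eq_true_eq, beq_iff_eq]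
    constructor
    · rintro ⟨jq, ⟨⟨hmem, hkey⟩, hpred⟩, rfl⟩; exact ⟨jq, hmem, hkey, hpred, rfl⟩
    · rintro ⟨jq, hmem, hkey, hpred, rfl⟩; exact ⟨jq, ⟨⟨hmem, hkey⟩, hpred⟩, rfl⟩
  have nodup_cand : ((pvOffsB Eps).flatMap g).Nodup := by
    rw [List.nodup_flatMap]
    constructor
    · intro o _
      rw [hg]
      have : ((E.filter (fun jq => pvKeyB Eps jq.2 == (c.1 + o.1, c.2 + o.2))).filter
          (fun jq => decide (pvPred Eps ip jq))).Pairwise (fun p q => p.1 < q.1) :=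
        (hpwE.filter _).filter _
      exact (List.pairwise_map.mpr this).imp (fun h => ne_of_lt h)
    · refine List.Pairwise.imp_of_mem ?_ (pv_offs_nodup Eps)
      intro o1 o2 _ _ hne a ha1 ha2
      obtain ⟨jq1, hm1, hk1, _, hj1⟩ := (mem_g a o1).mp ha1
      obtain ⟨jq2, hm2, hk2, _, hj2⟩ := (mem_g a o2).mp ha2
      have : jq1 = jq2 := pv_enum_inj hm1 hm2 (by rw [hj1, hj2])
      subst this
      rw [hk1] at hk2
      apply hne
      have h1 : c.1 + o1.1 = c.1 + o2.1 := congrArg Prod.fst hk2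
      have h2 : c.2 + o1.2 = c.2 + o2.2 := congrArg Prod.snd hk2
      exact Prod.ext (by omega) (by omega)
  have hmem : ∀ a, a ∈ ys ↔ a ∈ (pvOffsB Eps).flatMap g := by
    intro a
    rw [List.mem_flatMap, hys]
    simp only [List.mem_map, List.mem_filter, decide_eq_true_eq]
    constructor
    · rintro ⟨jq, ⟨hmemE, hpred⟩, rfl⟩
      refine ⟨((pvKeyB Eps jq.2).1 - c.1, (pvKeyB Eps jq.2).2 - c.2), ?_, ?_⟩
      · exact pv_cover Eps h0 ip.2 jq.2 hpred.2
      · rw [mem_g]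
        exact ⟨jq, hmemE, by simp, hpred, rfl⟩
    · rintro ⟨o, _, ha⟩
      obtain ⟨jq, hmemE, _, hpred, rfl⟩ := (mem_g a o).mp ha
      exact ⟨jq, ⟨hmemE, hpred⟩, rfl⟩
  have hperm : ys.Perm ((pvOffsB Eps).flatMap g) :=
    (List.perm_ext_iff_of_nodup nodup_ys nodup_cand).mpr hmem
  exact PySem.List.sorted_eq_of_perm_of_pairwise_lt _ _ _ hperm hpw_ys

-- A is the pair-fold over the lexicographic pair list
lemma pv_A_eq (points : List (Int × Int)) (Eps : Int) :
    getSurroundPoint points Eps = (pvBuild (pvPairs points Eps)).items := by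
  unfold getSurroundPoint pvBuild pvPairs
  rw [List.foldl_flatMap]
  congr 1
  apply PySem.List.foldl_congr_mem
  intro acc ip _
  calc (PySem.List.enumerate points).foldl (fun d jq =>
        if ip.1 < jq.1 then
          if distance ip.2 jq.2 ≤ Eps then
            let d1 := d.setdefault ip.1 []
            let d2 := d1.setdefault jq.1 []
            let d3 := d2.modify ip.1 [] (· ++ [jq.1])
            d3.modify jq.1 [] (· ++ [ip.1])
          else d
        else d) acc
      = (PySem.List.enumerate points).foldl
          (fun d jq => if pvPred Eps ip jq then pvLink d ip.1 jq.1 else d) acc := by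
        apply PySem.List.foldl_congr_mem
        intro d jq _
        by_cases h1 : ip.1 < jq.1
        · by_cases h2 : distance ip.2 jq.2 ≤ Eps
          · rw [if_pos h1, if_pos h2, if_pos ⟨h1, h2⟩]; rfl
          · rw [if_pos h1, if_neg h2, if_neg (by exact fun h => h2 h.2)]
        · rw [if_neg h1, if_neg (by exact fun h => h1 h.1)]
    _ = ((PySem.List.enumerate points).filter (fun jq => decide (pvPred Eps ip jq))).foldl
          (fun d jq => pvLink d ip.1 jq.1) acc :=
        PySem.List.foldl_ite_eq_foldl_filter (pvPred Eps ip) _ _ _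
    _ = (((PySem.List.enumerate points).filter (fun jq => decide (pvPred Eps ip jq))).map
          (fun jq => (ip.1, jq.1))).foldl (fun d pr => pvLink d pr.1 pr.2) acc := by
        rw [List.foldl_map]

-- B is the same pair-fold over the same pair list
lemma pv_B_eq (points : List (Int × Int)) (Eps : Int) :
    getSurroundPoint_alt points Eps = (pvBuild (pvPairs points Eps)).items := by
  unfold getSurroundPoint_alt
  by_cases h : Eps < 0
  · rw [if_pos h]
    have hnil : pvPairs points Eps = [] := by
      unfold pvPairs
      rw [List.flatMap_eq_nil_iff]
      intro ip _
      rw [List.map_eq_nil_iff, List.filter_eq_nil_iff]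
      intro jq _
      simp only [decide_eq_true_eq]
      rintro ⟨-, hd⟩
      have : (0 : Int) ≤ |ip.2.1 - jq.2.1| := abs_nonneg _
      have := le_trans (le_max_left |ip.2.1 - jq.2.1| |ip.2.2 - jq.2.2|) hd
      omega
    rw [hnil]
    rfl
  · rw [if_neg h]
    have h0 : 0 ≤ Eps := by omega
    unfold pvBuild pvPairs
    rw [List.foldl_flatMap]
    simp only []
    congr 1
    apply PySem.List.foldl_congr_mem
    intro acc ip _
    have hcand := pv_cand_eq points Eps h0 ip
    unfold pvGrid at hcand
    rw [hcand, List.foldl_map, List.foldl_map]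
    rfl

-- ===== VERDICT (by name: the statement is the Claim_ definition above) =====
theorem getSurroundPoint_spec : Claim_equal_getSurroundPoint := by
  intro points Eps _
  unfold Spec_getSurroundPoint
  rw [pv_A_eq, pv_B_eq]
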